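-- pv_equiv track=rewrite | github.com/OmarElawady/pless | pless/pgn.py | eliminate_comments
-- ===== SOURCE A (Python) =====
-- def eliminate_comments(pgn_defintion):
--     res = ""
--     in_comment = False
--     comment_type = ";"
--     for c in pgn_defintion:
--         if in_comment:
--             if comment_type == ";" and c == "\n":
--                 if c == "\n":
--                     res += "\n"
--                 in_comment = False
--             elif comment_type == "{" and c == "}":
--                 in_comment = False
--         else:
--             if c == "{":
--                 in_comment = True
--                 comment_type = "{"
--             elif c == ";":
--                 in_comment = True
--                 comment_type = ";"
--             else:
--                 res += c
--     return res
-- ===== SOURCE B (Python) =====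
-- def eliminate_comments(pgn_defintion):
--     res = []
--     i = 0
--     n = len(pgn_defintion)
--     while i < n:
--         c = pgn_defintion[i]
--         if c == '{':
--             j = pgn_defintion.find('}', i + 1)
--             if j == -1:
--                 break
--             i = j + 1
--         elif c == ';':
--             j = pgn_defintion.find('\n', i + 1)
--             if j == -1:
--                 break
--             res.append('\n')
--             i = j + 1
--         else:
--             res.append(c)
--             i += 1
--     return ''.join(res)
-- ===== Notes on version B (the rewrite author's own statement) =====
-- stated objective: simpler
-- what changed: Replaces the per-character state machine (in_comment flag + comment_type) with an index cursor that jumps past each comment in one step using str.find to locate each comment's terminator.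
import Mathlib
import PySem

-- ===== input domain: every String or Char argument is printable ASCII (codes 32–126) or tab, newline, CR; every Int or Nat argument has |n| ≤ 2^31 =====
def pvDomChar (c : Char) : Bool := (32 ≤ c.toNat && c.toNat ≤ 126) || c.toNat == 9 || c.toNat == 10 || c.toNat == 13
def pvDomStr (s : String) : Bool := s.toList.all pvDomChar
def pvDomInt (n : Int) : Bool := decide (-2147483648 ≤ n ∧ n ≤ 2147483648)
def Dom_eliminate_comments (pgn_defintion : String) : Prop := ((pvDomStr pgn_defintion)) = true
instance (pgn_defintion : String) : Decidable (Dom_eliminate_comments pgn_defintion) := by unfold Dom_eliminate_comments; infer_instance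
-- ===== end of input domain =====

-- B strips comments with an index cursor that jumps past each whole comment via a find-style scan, instead of A's per-character state machine with in_comment/comment_type flags (objective: simpler).

-- ===== PORT A =====
-- the for-loop with state (res, in_comment, comment_type); res kept as List Char, joined at the end
def pvAGo : List Char → List Char → Bool → String → List Char
  | [], res, _, _ => res
  | c :: rest, res, in_comment, comment_type =>
    if in_comment then
      if comment_type = ";" ∧ c = '\n' then
        -- Python's inner 'if c == "\n"' (always true here) appends the newline
        pvAGo rest (if c = '\n' then res ++ ['\n'] else res) false comment_type
      else if comment_type = "{" ∧ c = '}' then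
        pvAGo rest res false comment_type
      else
        pvAGo rest res in_comment comment_type
    else
      if c = '{' then pvAGo rest res true "{"
      else if c = ';' then pvAGo rest res true ";"
      else pvAGo rest (res ++ [c]) in_comment comment_type

def eliminate_comments (pgn_defintion : String) : String :=
  String.ofList (pvAGo pgn_defintion.toList [] false ";")

-- ===== PORT B =====
-- pgn.find(ch, i+1): the suffix strictly after the first occurrence of ch, or none (find = -1)
def pvSkipAfter (ch : Char) : List Char → Option (List Char)
  | [] => none
  | c :: rest => if c = ch then some rest else pvSkipAfter ch rest

theorem pvSkipAfter_length {ch : Char} : ∀ {l r : List Char}, pvSkipAfter ch l = some r → r.length ≤ l.length := by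
  intro l
  induction l with
  | nil => intro r h; simp [pvSkipAfter] at h
  | cons c rest ih =>
    intro r h
    simp only [pvSkipAfter] at h
    split at h
    · cases h; simp
    · exact Nat.le_trans (ih h) (Nat.le_succ _)

-- the while-loop over the cursor: each comment is skipped in one step
def pvBGo : List Char → List Char
  | [] => []
  | c :: rest =>
    if c = '{' then
      match h : pvSkipAfter '}' rest with
      | none => []
      | some r => pvBGo r
    else if c = ';' then
      match h : pvSkipAfter '\n' rest with
      | none => []
      | some r => '\n' :: pvBGo r
    else c :: pvBGo rest
termination_by l => l.length
decreasing_by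
  · exact Nat.lt_succ_of_le (pvSkipAfter_length h)
  · exact Nat.lt_succ_of_le (pvSkipAfter_length h)
  · simp

def eliminate_comments_alt (pgn_defintion : String) : String :=
  String.ofList (pvBGo pgn_defintion.toList)

-- ===== PRECONDITION & SPEC =====
def Spec_eliminate_comments (pgn_defintion : String) (out : String) : Prop := out = eliminate_comments_alt pgn_defintion
instance (pgn_defintion : String) (out : String) : Decidable (Spec_eliminate_comments pgn_defintion out) := by unfold Spec_eliminate_comments; infer_instance

-- ===== CLAIM (what is proved, stated in full; the proofs are below) =====
def Claim_equal_eliminate_comments : Prop := ∀ (pgn_defintion : String), Dom_eliminate_comments pgn_defintion → Spec_eliminate_comments pgn_defintion (eliminate_comments pgn_defintion)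

-- ===== LEMMAS AND PROOFS =====

-- inside a ';' comment, A scans to the first newline: emit it and resume, or end with res
theorem pvAGo_semi : ∀ (l res : List Char),
    pvAGo l res true ";" =
      (match pvSkipAfter '\n' l with
       | none => res
       | some r => pvAGo r (res ++ ['\n']) false ";") := by
  intro l
  induction l with
  | nil => intro res; simp [pvAGo, pvSkipAfter]
  | cons c rest ih =>
    intro res
    by_cases hc : c = '\n'
    · subst hc; simp [pvAGo, pvSkipAfter]
    · simp [pvAGo, pvSkipAfter, hc, ih]

-- inside a '{' comment, A scans to the first '}': resume there, or end with res
theorem pvAGo_brace : ∀ (l res : List Char),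
    pvAGo l res true "{" =
      (match pvSkipAfter '}' l with
       | none => res
       | some r => pvAGo r res false "{") := by
  intro l
  induction l with
  | nil => intro res; simp [pvAGo, pvSkipAfter]
  | cons c rest ih =>
    intro res
    by_cases hc : c = '}'
    · subst hc; simp [pvAGo, pvSkipAfter]
    · simp [pvAGo, pvSkipAfter, hc, ih]

-- outside a comment, A's state machine computes res ++ B's cursor loop
theorem pvAGo_eq_bGo : ∀ (l res : List Char) (ct : String),
    pvAGo l res false ct = res ++ pvBGo l := by
  intro l
  induction l using pvBGo.induct with
  | case1 => intro res ct; simp [pvAGo, pvBGo]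
  | case2 rest h =>
    intro res ct
    simp only [pvAGo, if_neg (by decide : ¬ false = true)]
    rw [pvAGo_brace, pvBGo]
    simp only [h]
    split <;> (try split) <;> simp_all
  | case3 rest r h ih =>
    intro res ct
    simp only [pvAGo, if_neg (by decide : ¬ false = true)]
    rw [pvAGo_brace, pvBGo]
    simp only [h]
    split <;> (try split) <;> simp_all
  | case4 rest h1 h =>
    intro res ct
    simp only [pvAGo, if_neg (by decide : ¬ (';' : Char) = '{'), if_neg (by decide : ¬ false = true)]
    rw [pvAGo_semi, pvBGo]
    simp only [h1]
    split <;> (try split) <;> simp_all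
  | case5 rest r h h1 ih =>
    intro res ct
    simp only [pvAGo, if_neg (by decide : ¬ (';' : Char) = '{'), if_neg (by decide : ¬ false = true)]
    rw [pvAGo_semi, pvBGo]
    simp only [h]
    split <;> (try split) <;> simp_all
  | case6 c rest h1 h2 ih =>
    intro res ct
    rw [pvBGo]
    simp [pvAGo, h1, h2, ih]

-- ===== VERDICT (by name: the statement is the Claim_ definition above) =====
theorem eliminate_comments_spec : Claim_equal_eliminate_comments := by
  intro s _
  unfold Spec_eliminate_comments eliminate_comments eliminate_comments_alt
  rw [pvAGo_eq_bGo]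
  rfl
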